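-- pv_equiv track=rewrite | github.com/acrual/repotron | Euler/problema12.py | triangleNumbers
-- ===== SOURCE A (Python) =====
-- def triangleNumbers(n):
--     naturales = []
--     triangles = []
--     suma = 0
--     for i in range(1, n):
--         naturales.append(i)
--         suma = suma + i
--         triangles.append(suma)
--     return triangles
-- ===== SOURCE B (Python) =====
-- def triangleNumbers(n):
--     return [i * (i + 1) // 2 for i in range(1, n)]
-- ===== Notes on version B (the rewrite author's own statement) =====
-- stated objective: simpler
-- what changed: Replaces the running-sum accumulator loop (and the unused naturales list) with a direct closed-form computation of each triangle number (i times its successor, halved by integer division), making every element independent of the previous ones.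
import Mathlib
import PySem

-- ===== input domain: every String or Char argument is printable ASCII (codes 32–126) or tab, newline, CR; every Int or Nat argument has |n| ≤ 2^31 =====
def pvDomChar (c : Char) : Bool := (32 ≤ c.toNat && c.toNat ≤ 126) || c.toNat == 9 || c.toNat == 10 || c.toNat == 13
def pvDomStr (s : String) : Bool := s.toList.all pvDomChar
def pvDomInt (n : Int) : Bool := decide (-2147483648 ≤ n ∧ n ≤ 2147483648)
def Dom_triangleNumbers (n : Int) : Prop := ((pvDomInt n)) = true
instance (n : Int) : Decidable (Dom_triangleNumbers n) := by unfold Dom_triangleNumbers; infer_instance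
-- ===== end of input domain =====

-- B replaces A's running-sum accumulator (and unused `naturales` list) with the closed-form triangle formula per element; objective: simpler.


-- ===== PORT A =====
-- state = (naturales, suma, triangles), exactly A's loop variables
def triangleNumbers (n : Int) : List Int :=
  (((PySem.List.pyRange 1 n).foldl
    (fun (st : List Int × Int × List Int) i =>
      (st.1 ++ [i], st.2.1 + i, st.2.2 ++ [st.2.1 + i]))
    ([], 0, []))).2.2

-- ===== PORT B =====
def triangleNumbers_alt (n : Int) : List Int :=
  (PySem.List.pyRange 1 n).map (fun i => PySem.Int.floordiv (i * (i + 1)) 2)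

-- ===== PRECONDITION & SPEC =====
def Spec_triangleNumbers (n : Int) (out : List Int) : Prop := out = triangleNumbers_alt n
instance (n : Int) (out : List Int) : Decidable (Spec_triangleNumbers n out) := by unfold Spec_triangleNumbers; infer_instance

-- ===== CLAIM (what is proved, stated in full; the proofs are below) =====
def Claim_equal_triangleNumbers : Prop := ∀ (n : Int), Dom_triangleNumbers n → Spec_triangleNumbers n (triangleNumbers n)

-- ===== LEMMAS AND PROOFS =====

-- the loop invariant: after processing range(1, 1+k) the state is
-- (the naturals, the k-th triangle number, the list of triangle numbers)
theorem pvLoop (k : Nat) :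
    ((PySem.List.pyRange 1 (1 + (k : Int))).foldl
      (fun (st : List Int × Int × List Int) i =>
        (st.1 ++ [i], st.2.1 + i, st.2.2 ++ [st.2.1 + i]))
      ([], 0, []))
    = (PySem.List.pyRange 1 (1 + (k : Int)),
       PySem.Int.floordiv ((k : Int) * ((k : Int) + 1)) 2,
       (PySem.List.pyRange 1 (1 + (k : Int))).map
         (fun i => PySem.Int.floordiv (i * (i + 1)) 2)) := by
  induction k with
  | zero => decide
  | succ k ih =>
    have h1 : (1 : Int) ≤ 1 + (k : Int) := by omega
    have hr : PySem.List.pyRange 1 (1 + ((k + 1 : Nat) : Int))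
        = PySem.List.pyRange 1 (1 + (k : Int)) ++ [1 + (k : Int)] := by
      push_cast
      rw [show (1 : Int) + ((k : Int) + 1) = (1 + (k : Int)) + 1 by ring]
      exact PySem.List.pyRange_one_succ_right h1
    have harith : PySem.Int.floordiv ((k : Int) * ((k : Int) + 1)) 2 + (1 + (k : Int))
        = PySem.Int.floordiv ((1 + (k : Int)) * ((1 + (k : Int)) + 1)) 2 := by
      rw [PySem.Int.floordiv_eq_ediv_of_pos (by omega),
          PySem.Int.floordiv_eq_ediv_of_pos (by omega),
          show (1 + (k : Int)) * ((1 + (k : Int)) + 1)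
             = (k : Int) * ((k : Int) + 1) + (1 + (k : Int)) * 2 by ring,
          Int.add_mul_ediv_right _ _ (by omega : (2 : Int) ≠ 0)]
    rw [hr, List.foldl_append, ih]
    simp only [List.foldl, List.map_append, List.map]
    push_cast
    refine Prod.ext rfl (Prod.ext ?_ ?_) <;> simp only
    · rw [harith]; ring_nf
    · rw [harith]

theorem triangleNumbers_eq (n : Int) : triangleNumbers n = triangleNumbers_alt n := by
  unfold triangleNumbers triangleNumbers_alt
  by_cases h : n ≤ 1
  · rw [PySem.List.pyRange_one_eq_nil h]
    rfl
  · have hk : n = 1 + (((n - 1).toNat : Nat) : Int) := by omega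
    rw [hk, pvLoop]

-- ===== VERDICT (by name: the statement is the Claim_ definition above) =====
theorem triangleNumbers_spec : Claim_equal_triangleNumbers := by
  intro n _
  exact triangleNumbers_eq n
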